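-- pv_equiv track=rewrite | github.com/yukigolimlim/New_BSV_OCR_AI_ENHANCED | _NEWOCR_AI_ENHANCED/general_lookup.py | _pages_for_type
-- ===== SOURCE A (Python) =====
-- def _pages_for_type(page_map: dict, doc_type: str,
--                     total_pages: int, padding: int = 1) -> list:
--     matched = sorted(pg for pg, t in page_map.items() if t == doc_type)
--     if not matched:
--         return list(range(1, total_pages + 1))
--     expanded = set()
--     for pg in matched:
--         for offset in range(-padding, padding + 1):
--             n = pg + offset
--             if 1 <= n <= total_pages:
--                 expanded.add(n)
--     return sorted(expanded)
-- ===== SOURCE B (Python) =====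
-- def _pages_for_type(page_map: dict, doc_type: str,
--                     total_pages: int, padding: int = 1) -> list:
--     matched = [pg for pg, t in page_map.items() if t == doc_type]
--     if not matched:
--         return list(range(1, total_pages + 1))
--     return [n for n in range(1, total_pages + 1)
--             if any(pg - padding <= n <= pg + padding for pg in matched)]
-- ===== Notes on version B (the rewrite author's own statement) =====
-- stated objective: simpler
-- what changed: Replaces A's sort + per-page offset loop accumulating a set that is sorted again by a single sweep over 1..total_pages keeping each page within `padding` of some matched page; no set, no sorting at all.
import Mathlib
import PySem

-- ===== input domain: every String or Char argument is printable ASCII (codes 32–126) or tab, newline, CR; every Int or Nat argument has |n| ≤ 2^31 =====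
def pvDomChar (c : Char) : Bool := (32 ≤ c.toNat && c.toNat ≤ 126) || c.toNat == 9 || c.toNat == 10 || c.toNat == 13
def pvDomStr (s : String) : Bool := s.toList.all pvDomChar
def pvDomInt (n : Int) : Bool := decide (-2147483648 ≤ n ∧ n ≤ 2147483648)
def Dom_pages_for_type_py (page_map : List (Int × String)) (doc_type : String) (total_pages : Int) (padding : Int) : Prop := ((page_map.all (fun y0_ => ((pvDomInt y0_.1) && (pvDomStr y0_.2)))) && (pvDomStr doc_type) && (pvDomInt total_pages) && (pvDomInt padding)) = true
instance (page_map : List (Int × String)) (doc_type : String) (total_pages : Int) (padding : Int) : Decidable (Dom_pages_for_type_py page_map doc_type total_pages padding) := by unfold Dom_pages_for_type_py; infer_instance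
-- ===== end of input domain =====

-- B replaces A's sort + offset-set accumulation by a single filter over range(1, total_pages+1)
-- testing closeness to some matched page: simpler (no set, no sorting), same return value.

-- ===== PORT A =====
def pages_for_type_py (page_map : List (Int × String)) (doc_type : String) (total_pages : Int) (padding : Int) : List Int :=
  let matched : List Int :=
    PySem.List.sorted ((page_map.filter (fun p => p.2 == doc_type)).map (·.1)) (fun x => x) false
  if matched = [] then
    PySem.List.pyRange 1 (total_pages + 1) 1
  else
    let expanded : PySem.Set Int :=
      matched.foldl (fun s pg =>
        (PySem.List.pyRange (-padding) (padding + 1) 1).foldl (fun s offset =>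
          let n := pg + offset
          if 1 ≤ n ∧ n ≤ total_pages then PySem.Set.add s n else s) s) PySem.Set.empty
    PySem.List.sorted expanded (fun x => x) false

-- ===== PORT B =====
def pages_for_type_py_alt (page_map : List (Int × String)) (doc_type : String) (total_pages : Int) (padding : Int) : List Int :=
  let matched : List Int := (page_map.filter (fun p => p.2 == doc_type)).map (·.1)
  if matched = [] then
    PySem.List.pyRange 1 (total_pages + 1) 1
  else
    (PySem.List.pyRange 1 (total_pages + 1) 1).filter
      (fun n => matched.any (fun pg => decide (pg - padding ≤ n) && decide (n ≤ pg + padding)))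

-- ===== PRECONDITION & SPEC =====
def Spec_pages_for_type_py (page_map : List (Int × String)) (doc_type : String) (total_pages : Int) (padding : Int) (out : List Int) : Prop := out = pages_for_type_py_alt page_map doc_type total_pages padding
instance (page_map : List (Int × String)) (doc_type : String) (total_pages : Int) (padding : Int) (out : List Int) : Decidable (Spec_pages_for_type_py page_map doc_type total_pages padding out) := by unfold Spec_pages_for_type_py; infer_instance

-- ===== CLAIM (what is proved, stated in full; the proofs are below) =====
def Claim_equal_pages_for_type_py : Prop := ∀ (page_map : List (Int × String)) (doc_type : String) (total_pages : Int) (padding : Int), Dom_pages_for_type_py page_map doc_type total_pages padding → Spec_pages_for_type_py page_map doc_type total_pages padding (pages_for_type_py page_map doc_type total_pages padding)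

-- ===== LEMMAS AND PROOFS =====

-- membership in the inner (offset) fold of A
lemma mem_inner_fold (pg total_pages : Int) (offs : List Int) (s : PySem.Set Int) (y : Int) :
    y ∈ offs.foldl (fun s offset =>
        let n := pg + offset
        if 1 ≤ n ∧ n ≤ total_pages then PySem.Set.add s n else s) s ↔
      y ∈ s ∨ ∃ o ∈ offs, y = pg + o ∧ 1 ≤ y ∧ y ≤ total_pages := by
  induction offs generalizing s with
  | nil => simp
  | cons o t ih =>
    simp only [List.foldl_cons, ih]
    split_ifs with h
    · simp only [PySem.Set.mem_add, List.mem_cons]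
      constructor
      · rintro ((hy | rfl) | ⟨b, hb, rfl, h1, h2⟩)
        · exact .inl hy
        · exact .inr ⟨o, .inl rfl, rfl, h.1, h.2⟩
        · exact .inr ⟨b, .inr hb, rfl, h1, h2⟩
      · rintro (hy | ⟨b, (rfl | hb), rfl, h1, h2⟩)
        · exact .inl (.inl hy)
        · exact .inl (.inr rfl)
        · exact .inr ⟨b, hb, rfl, h1, h2⟩
    · simp only [List.mem_cons]
      constructor
      · rintro (hy | ⟨b, hb, rfl, h1, h2⟩)
        · exact .inl hy
        · exact .inr ⟨b, .inr hb, rfl, h1, h2⟩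
      · rintro (hy | ⟨b, (rfl | hb), rfl, h1, h2⟩)
        · exact .inl hy
        · exact absurd ⟨h1, h2⟩ h
        · exact .inr ⟨b, hb, rfl, h1, h2⟩

-- the inner fold preserves Nodup
lemma nodup_inner_fold (pg total_pages : Int) (offs : List Int) (s : PySem.Set Int)
    (hs : s.Nodup) :
    (offs.foldl (fun s offset =>
        let n := pg + offset
        if 1 ≤ n ∧ n ≤ total_pages then PySem.Set.add s n else s) s).Nodup := by
  induction offs generalizing s with
  | nil => exact hs
  | cons o t ih =>
    simp only [List.foldl_cons]
    split_ifs with h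
    · exact ih _ (PySem.Set.nodup_add _ _ hs)
    · exact ih _ hs

-- membership in the outer (page) fold of A
lemma mem_outer_fold (total_pages padding : Int) (ms : List Int) (s : PySem.Set Int) (y : Int) :
    y ∈ ms.foldl (fun s pg =>
        (PySem.List.pyRange (-padding) (padding + 1) 1).foldl (fun s offset =>
          let n := pg + offset
          if 1 ≤ n ∧ n ≤ total_pages then PySem.Set.add s n else s) s) s ↔
      y ∈ s ∨ ∃ pg ∈ ms, (∃ o, -padding ≤ o ∧ o < padding + 1 ∧ y = pg + o) ∧
        1 ≤ y ∧ y ≤ total_pages := by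
  induction ms generalizing s with
  | nil => simp
  | cons pg t ih =>
    simp only [List.foldl_cons, ih, mem_inner_fold, PySem.List.mem_pyRange_one, List.mem_cons]
    constructor
    · rintro ((hy | ⟨o, ⟨ho1, ho2⟩, rfl, h1, h2⟩) | ⟨b, hb, ⟨o, ho1, ho2, rfl⟩, h1, h2⟩)
      · exact .inl hy
      · exact .inr ⟨pg, .inl rfl, ⟨o, ho1, ho2, rfl⟩, h1, h2⟩
      · exact .inr ⟨b, .inr hb, ⟨o, ho1, ho2, rfl⟩, h1, h2⟩
    · rintro (hy | ⟨b, (rfl | hb), ⟨o, ho1, ho2, rfl⟩, h1, h2⟩)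
      · exact .inl (.inl hy)
      · exact .inl (.inr ⟨o, ⟨ho1, ho2⟩, rfl, h1, h2⟩)
      · exact .inr ⟨b, hb, ⟨o, ho1, ho2, rfl⟩, h1, h2⟩

-- the outer fold preserves Nodup
lemma nodup_outer_fold (total_pages padding : Int) (ms : List Int) (s : PySem.Set Int)
    (hs : s.Nodup) :
    (ms.foldl (fun s pg =>
        (PySem.List.pyRange (-padding) (padding + 1) 1).foldl (fun s offset =>
          let n := pg + offset
          if 1 ≤ n ∧ n ≤ total_pages then PySem.Set.add s n else s) s) s).Nodup := by
  induction ms generalizing s with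
  | nil => exact hs
  | cons pg t ih => exact ih _ (nodup_inner_fold _ _ _ _ hs)

-- ===== VERDICT (by name: the statement is the Claim_ definition above) =====
theorem pages_for_type_py_spec : Claim_equal_pages_for_type_py := by
  intro page_map doc_type total_pages padding _hDom
  unfold Spec_pages_for_type_py pages_for_type_py pages_for_type_py_alt
  set M : List Int := (page_map.filter (fun p => p.2 == doc_type)).map (·.1) with hM
  by_cases hnil : M = []
  · simp [hnil, PySem.List.sorted_eq_nil_iff]
  · have hsnil : ¬ PySem.List.sorted M (fun x => x) false = [] := by
      simpa [PySem.List.sorted_eq_nil_iff] using hnil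
    simp only [hsnil, hnil, if_false]
    -- goal: sorted expanded = filtered range
    apply PySem.List.sorted_eq_of_perm_of_pairwise_lt
    · -- filtered range is a permutation of the set's element list
      apply (List.perm_ext_iff_of_nodup
        (List.Nodup.filter _ (PySem.List.nodup_pyRange_one 1 (total_pages + 1)))
        (nodup_outer_fold total_pages padding _ _ (by simp [PySem.Set.empty]))).2
      intro y
      rw [List.mem_filter, PySem.List.mem_pyRange_one, mem_outer_fold]
      simp only [PySem.List.mem_sorted, List.any_eq_true, Bool.and_eq_true, decide_eq_true_eq,
        PySem.Set.empty, List.not_mem_nil, false_or]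
      constructor
      · rintro ⟨⟨h1, h2⟩, pg, hpg, hlo, hhi⟩
        exact ⟨pg, hpg, ⟨y - pg, by omega, by omega, by omega⟩, h1, by omega⟩
      · rintro ⟨pg, hpg, ⟨o, ho1, ho2, rfl⟩, h1, h2⟩
        exact ⟨⟨h1, by omega⟩, pg, hpg, by omega, by omega⟩
    · -- filtered range is strictly increasing
      exact (PySem.List.pairwise_lt_pyRange_one 1 (total_pages + 1)).filter _
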